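-- pv_equiv track=rewrite | github.com/appleternity/planning_final_project | benchmark.py | is_cc_similar
-- ===== SOURCE A (Python) =====
-- def is_cc_similar(cc1, cc2):
--     ok1, bad1 = cc1
--     ok2, bad2 = cc2
--
--     # total size not equal
--     if len(ok1) + len(bad1) != len(ok2) + len(bad2):
--         return False
--     if len(ok1) != len(ok2):
--         return False
--     if len(bad1) != len(bad2):
--         return False
--
--     # check ok list
--     for l1 in ok1:
--         st1 = set(l1)
--         for l2 in ok2:
--             st2 = set(l2)
--             if st1 & st2:
--                 break
--         else:
--             return False
--     for l1 in ok2: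
--         st1 = set(l1)
--         for l2 in ok1:
--             st2 = set(l2)
--             if st1 & st2:
--                 break
--         else:
--             return False
--
--     # check bad list
--     for l1 in bad1:
--         st1 = set(l1)
--         for l2 in bad2:
--             st2 = set(l2)
--             if st1 & st2:
--                 break
--         else:
--             return False
--     for l1 in bad2:
--         st1 = set(l1)
--         for l2 in bad1:
--             st2 = set(l2)
--             if st1 & st2:
--                 break
--         else:
--             return False
--
--     return True
-- ===== SOURCE B (Python) =====
-- def _covers(g1, g2):
--     # inverted index: element -> set of indices of g2 sublists containing it
--     index = {}
--     for j, l in enumerate(g2):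
--         for x in l:
--             index.setdefault(x, set()).add(j)
--     covered = set()
--     for l in g1:
--         hits = set()
--         for x in l:
--             hits |= index.get(x, set())
--         if not hits:
--             return False
--         covered |= hits
--     return covered >= set(range(len(g2)))
--
-- def is_cc_similar(cc1, cc2):
--     ok1, bad1 = cc1
--     ok2, bad2 = cc2
--     if len(ok1) != len(ok2) or len(bad1) != len(bad2):
--         return False
--     return _covers(ok1, ok2) and _covers(bad1, bad2)
-- ===== Notes on version B (the rewrite author's own statement) =====
-- stated objective: alternative
-- what changed: Replaces the four nested all-pairs set-intersection scans with, per group pair, an inverted index (element -> indices of cc2-sublists containing it) and a single coverage pass over cc1's sublists that checks both directions at once (every cc1 list hits something, and the hit indices cover all of cc2); trades the pairwise rescans for index construction of similar overall cost on typical inputs.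
import Mathlib
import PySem

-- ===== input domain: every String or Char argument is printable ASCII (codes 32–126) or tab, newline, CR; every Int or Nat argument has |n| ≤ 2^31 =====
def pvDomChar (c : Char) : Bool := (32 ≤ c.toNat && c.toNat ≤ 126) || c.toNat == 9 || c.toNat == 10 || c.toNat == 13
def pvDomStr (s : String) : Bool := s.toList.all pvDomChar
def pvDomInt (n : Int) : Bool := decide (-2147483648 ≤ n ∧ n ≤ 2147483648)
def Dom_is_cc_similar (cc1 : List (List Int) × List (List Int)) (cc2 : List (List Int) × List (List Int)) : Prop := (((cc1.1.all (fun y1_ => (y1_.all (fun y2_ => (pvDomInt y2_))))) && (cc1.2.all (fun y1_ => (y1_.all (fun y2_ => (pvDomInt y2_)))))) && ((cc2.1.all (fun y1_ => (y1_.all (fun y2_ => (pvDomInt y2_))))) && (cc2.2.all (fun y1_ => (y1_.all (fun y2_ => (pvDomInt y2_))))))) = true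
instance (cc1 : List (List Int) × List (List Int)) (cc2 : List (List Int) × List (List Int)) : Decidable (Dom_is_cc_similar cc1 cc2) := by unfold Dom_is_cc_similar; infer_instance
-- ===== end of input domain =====

-- B replaces A's four nested all-pairs intersection scans by an inverted index plus one
-- coverage pass per group pair (objective: alternative decomposition; return values are equal).

-- ===== PORT A =====
-- the repeated 'for l1 in g1: for l2 in g2: if set(l1)&set(l2): break / else: return False' block
def aCheck (g1 g2 : List (List Int)) : Bool :=
  g1.all (fun l1 =>
    let st1 : PySem.Set Int := PySem.Set.ofList l1
    g2.any (fun l2 =>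
      let st2 : PySem.Set Int := PySem.Set.ofList l2
      !(PySem.Set.inter st1 st2).isEmpty))

def is_cc_similar (cc1 : List (List Int) × List (List Int)) (cc2 : List (List Int) × List (List Int)) : Bool :=
  let ok1 := cc1.1; let bad1 := cc1.2
  let ok2 := cc2.1; let bad2 := cc2.2
  if ok1.length + bad1.length ≠ ok2.length + bad2.length then false
  else if ok1.length ≠ ok2.length then false
  else if bad1.length ≠ bad2.length then false
  else if !aCheck ok1 ok2 then false
  else if !aCheck ok2 ok1 then false
  else if !aCheck bad1 bad2 then false
  else if !aCheck bad2 bad1 then false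
  else true

-- ===== PORT B =====
-- inverted index: element -> set of indices of g2 sublists containing it
def bIndex (g2 : List (List Int)) : PySem.Dict Int (PySem.Set Int) :=
  (PySem.List.enumerate g2).foldl
    (fun d p => p.2.foldl
      (fun d x => d.modify x PySem.Set.empty (fun s => PySem.Set.add s p.1)) d)
    PySem.Dict.empty

def bHits (idx : PySem.Dict Int (PySem.Set Int)) (l : List Int) : PySem.Set Int :=
  l.foldl (fun hits x => PySem.Set.union hits (idx.getD x PySem.Set.empty)) PySem.Set.empty

def bCover (idx : PySem.Dict Int (PySem.Set Int)) : List (List Int) → PySem.Set Int → Option (PySem.Set Int)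
  | [], covered => some covered
  | l :: rest, covered =>
    let hits := bHits idx l
    if hits.isEmpty then none
    else bCover idx rest (PySem.Set.union covered hits)

def bCovers (g1 g2 : List (List Int)) : Bool :=
  match bCover (bIndex g2) g1 PySem.Set.empty with
  | none => false
  | some covered => PySem.Set.issuperset covered (PySem.Set.ofList (PySem.List.pyRange 0 g2.length 1))

def is_cc_similar_alt (cc1 : List (List Int) × List (List Int)) (cc2 : List (List Int) × List (List Int)) : Bool :=
  let ok1 := cc1.1; let bad1 := cc1.2
  let ok2 := cc2.1; let bad2 := cc2.2
  if ok1.length ≠ ok2.length ∨ bad1.length ≠ bad2.length then false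
  else bCovers ok1 ok2 && bCovers bad1 bad2

-- ===== PRECONDITION & SPEC =====
def Spec_is_cc_similar (cc1 : List (List Int) × List (List Int)) (cc2 : List (List Int) × List (List Int)) (out : Bool) : Prop := out = is_cc_similar_alt cc1 cc2
instance (cc1 : List (List Int) × List (List Int)) (cc2 : List (List Int) × List (List Int)) (out : Bool) : Decidable (Spec_is_cc_similar cc1 cc2 out) := by unfold Spec_is_cc_similar; infer_instance

-- ===== CLAIM (what is proved, stated in full; the proofs are below) =====
def Claim_equal_is_cc_similar : Prop := ∀ (cc1 : List (List Int) × List (List Int)) (cc2 : List (List Int) × List (List Int)), Dom_is_cc_similar cc1 cc2 → Spec_is_cc_similar cc1 cc2 (is_cc_similar cc1 cc2)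

-- ===== LEMMAS AND PROOFS =====

lemma aCheck_iff (g1 g2 : List (List Int)) :
    aCheck g1 g2 = true ↔ ∀ l1 ∈ g1, ∃ l2 ∈ g2, ∃ x ∈ l1, x ∈ l2 := by
  simp only [aCheck, List.all_eq_true, List.any_eq_true]
  refine forall_congr' (fun l1 => forall_congr' (fun _ => exists_congr (fun l2 => and_congr_right (fun _ => ?_))))
  simp [pysem, List.eq_nil_iff_forall_not_mem]

lemma getD_line (l : List Int) (d : PySem.Dict Int (PySem.Set Int)) (jv x j : Int) :
    j ∈ (l.foldl (fun d x => d.modify x PySem.Set.empty (fun s => PySem.Set.add s jv)) d).getD x PySem.Set.empty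
      ↔ (j ∈ d.getD x PySem.Set.empty ∨ (x ∈ l ∧ j = jv)) := by
  induction l generalizing d with
  | nil => simp
  | cons y t ih =>
    simp only [List.foldl_cons, ih, PySem.Dict.getD_modify]
    by_cases hxy : x = y
    · subst hxy
      simp [PySem.Set.mem_add]
      try tauto
    · simp [hxy]
      try tauto

lemma getD_bIndex_aux (ps : List (Int × List Int)) (d : PySem.Dict Int (PySem.Set Int)) (x j : Int) :
    j ∈ (ps.foldl
        (fun d p => p.2.foldl
          (fun d x => d.modify x PySem.Set.empty (fun s => PySem.Set.add s p.1)) d) d).getD x PySem.Set.empty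
      ↔ (j ∈ d.getD x PySem.Set.empty ∨ ∃ p ∈ ps, x ∈ p.2 ∧ j = p.1) := by
  induction ps generalizing d with
  | nil => simp
  | cons p t ih =>
    simp only [List.foldl_cons, ih, getD_line]
    simp only [List.mem_cons]
    constructor
    · rintro (⟨h | ⟨hx, hj⟩⟩ | ⟨q, hq, hmem, hj⟩)
      · exact Or.inl h
      · exact Or.inr ⟨p, Or.inl rfl, hx, hj⟩
      · exact Or.inr ⟨q, Or.inr hq, hmem, hj⟩
    · rintro (h | ⟨q, (rfl | hq), hmem, hj⟩)
      · exact Or.inl (Or.inl h)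
      · exact Or.inl (Or.inr ⟨hmem, hj⟩)
      · exact Or.inr ⟨q, hq, hmem, hj⟩

lemma getD_bIndex (g2 : List (List Int)) (x j : Int) :
    j ∈ (bIndex g2).getD x PySem.Set.empty ↔ ∃ p ∈ PySem.List.enumerate g2, x ∈ p.2 ∧ j = p.1 := by
  simpa [PySem.Dict.getD_empty] using getD_bIndex_aux (PySem.List.enumerate g2) PySem.Dict.empty x j

lemma mem_bHits_aux (idx : PySem.Dict Int (PySem.Set Int)) (l : List Int) (s : PySem.Set Int) (j : Int) :
    j ∈ l.foldl (fun hits x => PySem.Set.union hits (idx.getD x PySem.Set.empty)) s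
      ↔ j ∈ s ∨ ∃ x ∈ l, j ∈ idx.getD x PySem.Set.empty := by
  induction l generalizing s with
  | nil => simp
  | cons y t ih =>
    simp only [List.foldl_cons, ih, PySem.Set.mem_union, List.mem_cons]
    constructor
    · rintro ((h | h) | ⟨x, hx, hj⟩)
      · exact Or.inl h
      · exact Or.inr ⟨y, Or.inl rfl, h⟩
      · exact Or.inr ⟨x, Or.inr hx, hj⟩
    · rintro (h | ⟨x, (rfl | hx), hj⟩)
      · exact Or.inl (Or.inl h)
      · exact Or.inl (Or.inr hj)
      · exact Or.inr ⟨x, hx, hj⟩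

lemma mem_bHits (g2 : List (List Int)) (l : List Int) (j : Int) :
    j ∈ bHits (bIndex g2) l ↔ ∃ p ∈ PySem.List.enumerate g2, (∃ x ∈ l, x ∈ p.2) ∧ j = p.1 := by
  simp only [bHits, mem_bHits_aux, getD_bIndex]
  constructor
  · rintro (h | ⟨x, hx, p, hp, hmem, hj⟩)
    · simp [PySem.Set.empty] at h
    · exact ⟨p, hp, ⟨x, hx, hmem⟩, hj⟩
  · rintro ⟨p, hp, ⟨x, hx, hmem⟩, hj⟩
    exact Or.inr ⟨x, hx, p, hp, hmem, hj⟩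

lemma exists_enumerate_iff (g2 : List (List Int)) (Q : List Int → Prop) :
    (∃ p ∈ PySem.List.enumerate g2, Q p.2) ↔ ∃ l2 ∈ g2, Q l2 := by
  constructor
  · rintro ⟨p, hp, hq⟩
    obtain ⟨k, hk, rfl⟩ := (PySem.List.mem_enumerate_iff g2 0 p).mp hp
    exact ⟨g2[k], List.getElem_mem hk, hq⟩
  · rintro ⟨l2, hl2, hq⟩
    obtain ⟨k, hk, rfl⟩ := List.mem_iff_getElem.mp hl2
    exact ⟨((k : Int), g2[k]), (PySem.List.mem_enumerate_iff g2 0 _).mpr ⟨k, hk, by simp⟩, hq⟩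

lemma bHits_empty_iff (g2 : List (List Int)) (l : List Int) :
    (bHits (bIndex g2) l).isEmpty = true ↔ ¬ ∃ l2 ∈ g2, ∃ x ∈ l, x ∈ l2 := by
  rw [List.isEmpty_iff, List.eq_nil_iff_forall_not_mem]
  constructor
  · intro h hex
    obtain ⟨p, hp, hmem⟩ := (exists_enumerate_iff g2 (fun l2 => ∃ x ∈ l, x ∈ l2)).mpr hex
    exact h p.1 ((mem_bHits g2 l _).mpr ⟨p, hp, hmem, rfl⟩)
  · intro h j hj
    obtain ⟨p, hp, hmem, _⟩ := (mem_bHits g2 l j).mp hj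
    exact h ((exists_enumerate_iff g2 (fun l2 => ∃ x ∈ l, x ∈ l2)).mp ⟨p, hp, hmem⟩)

lemma bCover_none_iff (idx : PySem.Dict Int (PySem.Set Int)) (g1 : List (List Int)) (c : PySem.Set Int) :
    bCover idx g1 c = none ↔ ∃ l ∈ g1, (bHits idx l).isEmpty = true := by
  induction g1 generalizing c with
  | nil => simp [bCover]
  | cons l t ih =>
    simp only [bCover]
    by_cases h : (bHits idx l).isEmpty = true
    · rw [if_pos h]
      simp only [List.mem_cons]
      exact iff_of_true trivial ⟨l, Or.inl rfl, h⟩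
    · rw [if_neg h, ih]
      simp only [List.mem_cons]
      constructor
      · rintro ⟨l', hl', he⟩
        exact ⟨l', Or.inr hl', he⟩
      · rintro ⟨l', (rfl | hl'), he⟩
        · exact absurd he h
        · exact ⟨l', hl', he⟩

lemma bCover_some_mem (idx : PySem.Dict Int (PySem.Set Int)) (g1 : List (List Int)) :
    ∀ (c c' : PySem.Set Int) (j : Int), bCover idx g1 c = some c' →
      (j ∈ c' ↔ j ∈ c ∨ ∃ l ∈ g1, j ∈ bHits idx l) := by
  induction g1 with
  | nil => intro c c' j h; simp [bCover] at h; subst h; simp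
  | cons l t ih =>
    intro c c' j h
    simp only [bCover] at h
    by_cases he : (bHits idx l).isEmpty = true
    · simp [he] at h
    · simp only [he] at h
      rw [ih _ _ j h, PySem.Set.mem_union]
      simp only [List.mem_cons]
      constructor
      · rintro ((h | h) | ⟨x, hx, hj⟩)
        · exact Or.inl h
        · exact Or.inr ⟨l, Or.inl rfl, h⟩
        · exact Or.inr ⟨x, Or.inr hx, hj⟩
      · rintro (h | ⟨x, (rfl | hx), hj⟩)
        · exact Or.inl (Or.inl h)
        · exact Or.inl (Or.inr hj)
        · exact Or.inr ⟨x, hx, hj⟩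

lemma bCovers_iff (g1 g2 : List (List Int)) :
    bCovers g1 g2 = true ↔
      (∀ l1 ∈ g1, ∃ l2 ∈ g2, ∃ x ∈ l1, x ∈ l2) ∧ (∀ l2 ∈ g2, ∃ l1 ∈ g1, ∃ x ∈ l1, x ∈ l2) := by
  unfold bCovers
  cases h : bCover (bIndex g2) g1 PySem.Set.empty with
  | none =>
    constructor
    · intro hfalse
      simp at hfalse
    · rintro ⟨hA, _⟩
      exfalso
      obtain ⟨l, hl, hemp⟩ := (bCover_none_iff _ _ _).mp h
      exact (bHits_empty_iff g2 l).mp hemp (hA l hl)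
  | some covered =>
    have hmem : ∀ j : Int, j ∈ covered ↔ ∃ l ∈ g1, j ∈ bHits (bIndex g2) l := by
      intro j
      rw [bCover_some_mem _ _ _ _ j h]
      simp [PySem.Set.empty]
    have hnone : ¬ ∃ l ∈ g1, (bHits (bIndex g2) l).isEmpty = true := by
      rw [← bCover_none_iff (bIndex g2) g1 PySem.Set.empty, h]
      simp
    have h1 : ∀ l1 ∈ g1, ∃ l2 ∈ g2, ∃ x ∈ l1, x ∈ l2 := by
      intro l1 hl1
      by_contra hno
      exact hnone ⟨l1, hl1, (bHits_empty_iff g2 l1).mpr hno⟩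
    rw [PySem.Set.issuperset_iff]
    constructor
    · intro hsup
      refine ⟨h1, ?_⟩
      intro l2 hl2
      obtain ⟨i, hi⟩ := List.getElem?_of_mem hl2
      obtain ⟨hilen, -⟩ := List.getElem?_eq_some_iff.mp hi
      have hic : (i : Int) ∈ covered := by
        apply hsup
        rw [PySem.Set.mem_ofList, PySem.List.mem_pyRange_one]
        constructor
        · exact_mod_cast Int.natCast_nonneg i
        · exact_mod_cast hilen
      obtain ⟨l, hl, hhit⟩ := (hmem _).mp hic
      obtain ⟨p, hp, ⟨x, hx, hmem2⟩, hj⟩ := (mem_bHits g2 l _).mp hhit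
      obtain ⟨k, hk, rfl⟩ := (PySem.List.mem_enumerate_iff g2 0 p).mp hp
      have hki : k = i := by omega
      subst hki
      obtain rfl : g2[k] = l2 := by
        have := List.getElem?_eq_getElem hk
        rw [hi] at this
        injection this with h'
        exact h'.symm
      exact ⟨l, hl, x, hx, hmem2⟩
    · rintro ⟨_, h2⟩
      intro j hj
      rw [PySem.Set.mem_ofList, PySem.List.mem_pyRange_one] at hj
      obtain ⟨hj0, hjlen⟩ := hj
      obtain ⟨i, rfl⟩ : ∃ i : Nat, j = (i : Int) := ⟨j.toNat, (Int.toNat_of_nonneg hj0).symm⟩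
      have hilen : i < g2.length := by exact_mod_cast hjlen
      obtain ⟨l1, hl1, x, hx, hmem2⟩ := h2 g2[i] (List.getElem_mem hilen)
      rw [hmem]
      refine ⟨l1, hl1, (mem_bHits g2 l1 _).mpr ⟨((i : Int), g2[i]), ?_, ⟨x, hx, hmem2⟩, rfl⟩⟩
      exact (PySem.List.mem_enumerate_iff g2 0 _).mpr ⟨i, hilen, by simp⟩

lemma bCovers_eq_aCheck (g1 g2 : List (List Int)) :
    bCovers g1 g2 = (aCheck g1 g2 && aCheck g2 g1) := by
  rw [Bool.eq_iff_iff, bCovers_iff, Bool.and_eq_true, aCheck_iff, aCheck_iff]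
  constructor
  · rintro ⟨h1, h2⟩
    exact ⟨h1, fun l2 hl2 => by obtain ⟨l1, hl1, x, hx1, hx2⟩ := h2 l2 hl2; exact ⟨l1, hl1, x, hx2, hx1⟩⟩
  · rintro ⟨h1, h2⟩
    exact ⟨h1, fun l2 hl2 => by obtain ⟨l1, hl1, x, hx1, hx2⟩ := h2 l2 hl2; exact ⟨l1, hl1, x, hx2, hx1⟩⟩

-- ===== VERDICT (by name: the statement is the Claim_ definition above) =====
theorem is_cc_similar_spec : Claim_equal_is_cc_similar := by
  unfold Claim_equal_is_cc_similar
  intro cc1 cc2 _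
  unfold Spec_is_cc_similar
  obtain ⟨ok1, bad1⟩ := cc1
  obtain ⟨ok2, bad2⟩ := cc2
  simp only [is_cc_similar, is_cc_similar_alt]
  by_cases h1 : ok1.length = ok2.length
  · by_cases h2 : bad1.length = bad2.length
    · simp only [h1, h2, ne_eq, not_true_eq_false, if_false, or_self, bCovers_eq_aCheck]
      by_cases a1 : aCheck ok1 ok2 = true <;> by_cases a2 : aCheck ok2 ok1 = true <;>
        by_cases a3 : aCheck bad1 bad2 = true <;> by_cases a4 : aCheck bad2 bad1 = true <;>
        simp [a1, a2, a3, a4]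
    · simp [h2]
  · simp [h1]
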